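-- pv_equiv track=rewrite | github.com/Mahsa0M/unet-3d-arbitrary-input-size | utils.py | get_id_from_filename
-- ===== SOURCE A (Python) =====
-- def get_id_from_filename(filename, all_numbers=True):
--     """
--     get id from a file or folder name
--     :param filename: file path or file name (or folder). id must be in the last section after '/', and
--                     it should be the only number in the name.
--     :param all_numbers: if False, the id MUST start wth '0'. Otherwise it can start with any number.
--     :return: patient id (str)
--     """
--     file_id = filename.split('/')[-1]
--     file_id = file_id.split('.')[0]
--
--     if all_numbers == False:
--         file_id = file_id[file_id.find('0'):]
--     if all_numbers == True:
--         def where(list, element):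
--             # find all ocurances of element in list
--             indx = [i for i, val in enumerate(list) if val == element]
--             return indx
--
--         # find locations of all numbers in the name
--         num_locations = where(file_id, '0') + where(file_id, '1') + where(file_id, '2') + \
--                         where(file_id, '3') + where(file_id, '4') + where(file_id, '5') + \
--                         where(file_id, '6') + where(file_id, '7') + where(file_id, '8') + \
--                         where(file_id, '9')
--         try:
--             file_id = file_id[min(num_locations):max(num_locations) + 1]
--         except:
--             raise ValueError('File name did not have a number in it.')
--     return file_id
-- ===== SOURCE B (Python) =====
-- def get_id_from_filename(filename, all_numbers=True):
--     file_id = filename.split('/')[-1]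
--     file_id = file_id.split('.')[0]
--
--     if all_numbers == False:
--         file_id = file_id[file_id.find('0'):]
--     if all_numbers == True:
--         first = -1
--         last = -1
--         for i, ch in enumerate(file_id):
--             if ch.isdigit():
--                 if first == -1:
--                     first = i
--                 last = i
--         if first == -1:
--             raise ValueError('File name did not have a number in it.')
--         file_id = file_id[first:last + 1]
--     return file_id
-- ===== Notes on version B (the rewrite author's own statement) =====
-- stated objective: simpler
-- what changed: A builds ten per-digit occurrence-index lists (one full scan of the name per digit character) and takes min/max of their concatenation; B makes a single enumerate pass that tracks the first and last digit index.
import Mathlib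
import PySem

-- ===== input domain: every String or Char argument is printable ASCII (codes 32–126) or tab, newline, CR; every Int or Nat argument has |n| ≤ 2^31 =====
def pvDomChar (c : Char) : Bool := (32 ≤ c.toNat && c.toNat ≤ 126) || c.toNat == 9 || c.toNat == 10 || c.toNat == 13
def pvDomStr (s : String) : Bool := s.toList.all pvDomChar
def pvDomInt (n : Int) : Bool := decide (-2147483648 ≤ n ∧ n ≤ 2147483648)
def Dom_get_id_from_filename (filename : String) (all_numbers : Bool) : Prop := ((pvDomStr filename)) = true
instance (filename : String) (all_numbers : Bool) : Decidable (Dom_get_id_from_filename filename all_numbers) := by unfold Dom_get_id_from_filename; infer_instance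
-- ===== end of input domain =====

-- B replaces A's ten occurrence-index lists plus min/max by one enumerate pass tracking the
-- first and last digit index (objective: simpler).

-- ===== PORT A =====
-- file_id = filename.split('/')[-1]; file_id = file_id.split('.')[0]
-- (split with a separator never returns an empty list, so [-1]/[0] are the last/first element)
def pvFileId (filename : String) : List Char :=
  (PySem.Chars.splitOn ((PySem.Chars.splitOn filename.toList ['/']).getLastD []) ['.']).headD []

-- where(list, element): [i for i, val in enumerate(list) if val == element]
def pvWhere (cs : List Char) (e : Char) : List Int :=
  ((PySem.List.enumerate cs).filter (fun p => p.2 == e)).map (fun p => p.1)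

-- num_locations = where(file_id,'0') + ... + where(file_id,'9')
def pvNumLocations (cs : List Char) : List Int :=
  pvWhere cs '0' ++ pvWhere cs '1' ++ pvWhere cs '2' ++
  pvWhere cs '3' ++ pvWhere cs '4' ++ pvWhere cs '5' ++
  pvWhere cs '6' ++ pvWhere cs '7' ++ pvWhere cs '8' ++ pvWhere cs '9'

def get_id_from_filename (filename : String) (all_numbers : Bool) : String :=
  let file_id := pvFileId filename
  let file_id :=
    if all_numbers == false then
      PySem.List.slice file_id (some (PySem.Chars.find file_id ['0'])) none
    else file_id
  if all_numbers == true then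
    let num_locations := pvNumLocations file_id
    match PySem.List.min? num_locations (fun x => x),
          PySem.List.max? num_locations (fun x => x) with
    | some mn, some mx => String.mk (PySem.List.slice file_id (some mn) (some (mx + 1)))
    | _, _ => ""  -- min([]) raises → ValueError('File name did not have a number in it.'); excluded by Pre_
  else String.mk file_id

-- ===== PORT B =====
-- for i, ch in enumerate(file_id): track the first and the last digit index in one pass
def pvScan : List Char → Int → Int × Int → Int × Int
  | [], _, acc => acc
  | c :: cs, i, (first, last) =>
    if PySem.Chars.isdigit c then
      pvScan cs (i + 1) ((if first = -1 then i else first), i)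
    else
      pvScan cs (i + 1) (first, last)

def get_id_from_filename_alt (filename : String) (all_numbers : Bool) : String :=
  let file_id := pvFileId filename
  if all_numbers then
    let fl := pvScan file_id 0 (-1, -1)
    if fl.1 = -1 then ""  -- raise ValueError('File name did not have a number in it.'); excluded by Pre_
    else String.mk (PySem.List.slice file_id (some fl.1) (some (fl.2 + 1)))
  else
    String.mk (PySem.List.slice file_id (some (PySem.Chars.find file_id ['0'])) none)

-- ===== PRECONDITION & SPEC =====
-- Pre_ excludes exactly the inputs where A raises ValueError: all_numbers=True and the name
-- part (last '/'-segment, before the first '.') contains no digit.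
def Pre_get_id_from_filename (filename : String) (all_numbers : Bool) : Prop :=
  all_numbers = true → (pvFileId filename).any PySem.Chars.isdigit = true

instance (filename : String) (all_numbers : Bool) : Decidable (Pre_get_id_from_filename filename all_numbers) := by
  unfold Pre_get_id_from_filename; infer_instance

def pvWitness_get_id_from_filename : String × Bool := ("data/scan_007.nii", true)

def Spec_get_id_from_filename (filename : String) (all_numbers : Bool) (out : String) : Prop := out = get_id_from_filename_alt filename all_numbers
instance (filename : String) (all_numbers : Bool) (out : String) : Decidable (Spec_get_id_from_filename filename all_numbers out) := by unfold Spec_get_id_from_filename; infer_instance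

-- ===== CLAIM (what is proved, stated in full; the proofs are below) =====
def Claim_equal_get_id_from_filename : Prop := ∀ (filename : String) (all_numbers : Bool), Dom_get_id_from_filename filename all_numbers → Pre_get_id_from_filename filename all_numbers → Spec_get_id_from_filename filename all_numbers (get_id_from_filename filename all_numbers)

-- ===== LEMMAS AND PROOFS =====

-- index of the LAST digit of cs, if any

def pvLdigit : List Char → Option Nat
  | [] => none
  | c :: cs =>
    match pvLdigit cs with
    | some j => some (j + 1)
    | none => if PySem.Chars.isdigit c then some 0 else none

lemma pvLdigit_some_digit (cs : List Char) (j : Nat) (h : pvLdigit cs = some j) :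
    ∃ a ∈ cs, PySem.Chars.isdigit a = true := by
  induction cs generalizing j with
  | nil => simp [pvLdigit] at h
  | cons c t ih =>
    simp only [pvLdigit] at h
    cases ht : pvLdigit t with
    | some i => obtain ⟨a, ha, hd⟩ := ih i ht; exact ⟨a, List.mem_cons_of_mem _ ha, hd⟩
    | none =>
      rw [ht] at h
      by_cases hc : PySem.Chars.isdigit c = true
      · exact ⟨c, List.mem_cons_self .., hc⟩
      · simp [hc] at h

lemma pvLdigit_eq_none_iff (cs : List Char) :
    pvLdigit cs = none ↔ ∀ c ∈ cs, PySem.Chars.isdigit c = false := by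
  induction cs with
  | nil => simp [pvLdigit]
  | cons c t ih =>
    simp only [pvLdigit]
    cases ht : pvLdigit t with
    | some j =>
      simp only [reduceCtorEq, false_iff]
      intro hall
      obtain ⟨a, ha, hd⟩ := pvLdigit_some_digit t j ht
      exact absurd (hall a (List.mem_cons_of_mem _ ha)) (by simp [hd])
    | none =>
      by_cases hc : PySem.Chars.isdigit c = true
      · rw [if_pos hc]
        simp only [reduceCtorEq, false_iff]
        intro hall
        exact absurd (hall c (List.mem_cons_self ..)) (by simp [hc])
      · rw [if_neg hc]
        constructor
        · intro _ a ha
          rcases List.mem_cons.mp ha with rfl | ha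
          · simpa using hc
          · exact ih.mp ht a ha
        · intro _; rfl

lemma pvLdigit_spec (cs : List Char) (l : Nat) (h : pvLdigit cs = some l) :
    ∃ hl : l < cs.length, PySem.Chars.isdigit cs[l] = true ∧
      ∀ j, l < j → ∀ hj : j < cs.length, PySem.Chars.isdigit cs[j] = false := by
  induction cs generalizing l with
  | nil => simp [pvLdigit] at h
  | cons c t ih =>
    simp only [pvLdigit] at h
    cases ht : pvLdigit t with
    | some j =>
      rw [ht] at h; simp at h; subst h
      obtain ⟨hl, hd, hrest⟩ := ih j ht
      refine ⟨by simpa using Nat.succ_lt_succ hl, by simpa using hd, ?_⟩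
      intro k hk hkl
      cases k with
      | zero => omega
      | succ k => simpa using hrest k (by omega) (by simpa using hkl)
    | none =>
      rw [ht] at h
      by_cases hc : PySem.Chars.isdigit c = true
      · simp [hc] at h; subst h
        refine ⟨by simp, by simpa using hc, ?_⟩
        intro k hk hkl
        cases k with
        | zero => omega
        | succ k =>
          have hkt : k < t.length := by simpa using hkl
          simpa using (pvLdigit_eq_none_iff t).mp ht t[k] (List.getElem_mem hkt)
      · simp [hc] at h

lemma findIdx?_none_iff_pvLdigit_none (t : List Char) :
    List.findIdx? PySem.Chars.isdigit t = none ↔ pvLdigit t = none := by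
  rw [List.findIdx?_eq_none_iff, pvLdigit_eq_none_iff]


lemma pvScan_spec (cs : List Char) (i first last : Int) (hi : 0 ≤ i) :
    pvScan cs i (first, last) =
      match List.findIdx? PySem.Chars.isdigit cs, pvLdigit cs with
      | some f, some l => ((if first = -1 then i + f else first), i + l)
      | _, _ => (first, last) := by
  induction cs generalizing i first last with
  | nil => simp [pvScan, pvLdigit]
  | cons c t ih =>
    by_cases hc : PySem.Chars.isdigit c = true
    · rw [pvScan, if_pos hc, ih _ _ _ (by omega)]
      rw [List.findIdx?_cons, if_pos hc]
      cases hl : pvLdigit t with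
      | some l =>
        have hf : ∃ f, List.findIdx? PySem.Chars.isdigit t = some f := by
          cases hft : List.findIdx? PySem.Chars.isdigit t with
          | none => rw [findIdx?_none_iff_pvLdigit_none, hl] at hft; cases hft
          | some f => exact ⟨f, rfl⟩
        obtain ⟨f, hft⟩ := hf
        rw [hft]
        simp only [pvLdigit, hl]
        by_cases hfi : first = -1
        · have : (if first = -1 then i else first) = i := by simp [hfi]
          rw [this]
          have hine : i ≠ -1 := by omega
          simp only [hfi, if_neg hine, Prod.mk.injEq, if_true]
          omega
        · have : (if first = -1 then i else first) = first := by simp [hfi]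
          rw [this]
          simp only [if_neg hfi, Prod.mk.injEq, true_and]
          push_cast
          omega
      | none =>
        have hft : List.findIdx? PySem.Chars.isdigit t = none :=
          (findIdx?_none_iff_pvLdigit_none t).mpr hl
        rw [hft]
        simp only [pvLdigit, hl, if_pos hc]
        by_cases hfi : first = -1 <;> simp [hfi]
    · rw [pvScan, if_neg hc, ih _ _ _ (by omega)]
      rw [List.findIdx?_cons, if_neg hc]
      simp only [pvLdigit]
      cases hl : pvLdigit t with
      | some l =>
        have hf : ∃ f, List.findIdx? PySem.Chars.isdigit t = some f := by
          cases hft : List.findIdx? PySem.Chars.isdigit t with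
          | none => rw [findIdx?_none_iff_pvLdigit_none, hl] at hft; cases hft
          | some f => exact ⟨f, rfl⟩
        obtain ⟨f, hft⟩ := hf
        rw [hft]
        simp only [Option.map_some]
        by_cases hfi : first = -1 <;> simp [hfi, Prod.mk.injEq] <;> omega
      | none =>
        have hft : List.findIdx? PySem.Chars.isdigit t = none :=
          (findIdx?_none_iff_pvLdigit_none t).mpr hl
        rw [hft]
        simp



lemma mem_enumerate_iff (cs : List Char) (s : Int) (p : Int × Char) :
    p ∈ PySem.List.enumerate cs s ↔ ∃ k : Nat, ∃ hk : k < cs.length, p.1 = s + k ∧ p.2 = cs[k] := by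
  induction cs generalizing s with
  | nil => simp [PySem.List.enumerate]
  | cons c t ih =>
    rw [PySem.List.enumerate_cons]
    simp only [List.mem_cons, ih]
    constructor
    · rintro (rfl | ⟨k, hk, h1, h2⟩)
      · exact ⟨0, by simp, by simp⟩
      · exact ⟨k + 1, by simpa using hk, by push_cast; omega, by simpa using h2⟩
    · rintro ⟨k, hk, h1, h2⟩
      cases k with
      | zero => left; simp at h1 h2; obtain ⟨a,b⟩ := p; simp_all
      | succ k => right; exact ⟨k, by simpa using hk, by push_cast at h1 ⊢; omega, by simpa using h2⟩

lemma mem_pvWhere (cs : List Char) (e : Char) (x : Int) :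
    x ∈ pvWhere cs e ↔ ∃ k : Nat, ∃ hk : k < cs.length, x = (k : Int) ∧ cs[k] = e := by
  simp only [pvWhere, List.mem_map, List.mem_filter, beq_iff_eq]
  constructor
  · rintro ⟨p, ⟨hp, he⟩, rfl⟩
    obtain ⟨k, hk, h1, h2⟩ := (mem_enumerate_iff cs 0 p).mp hp
    exact ⟨k, hk, by omega, by rw [← h2, he]⟩
  · rintro ⟨k, hk, rfl, he⟩
    exact ⟨((k : Int), e), ⟨(mem_enumerate_iff cs 0 ((k:Int), e)).mpr ⟨k, hk, by omega, he.symm⟩, rfl⟩, rfl⟩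

lemma isdigit_iff (c : Char) : PySem.Chars.isdigit c = true ↔
    (c = '0' ∨ c = '1' ∨ c = '2' ∨ c = '3' ∨ c = '4' ∨ c = '5' ∨ c = '6' ∨ c = '7' ∨ c = '8' ∨ c = '9') := by
  simp only [PySem.Chars.isdigit, Bool.and_eq_true, decide_eq_true_eq, Char.le_def,
    UInt32.le_iff_toNat_le, Char.ext_iff, ← UInt32.toNat_inj]
  have e0 : ('0':Char).val.toNat = 48 := rfl
  have e1 : ('1':Char).val.toNat = 49 := rfl
  have e2 : ('2':Char).val.toNat = 50 := rfl
  have e3 : ('3':Char).val.toNat = 51 := rfl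
  have e4 : ('4':Char).val.toNat = 52 := rfl
  have e5 : ('5':Char).val.toNat = 53 := rfl
  have e6 : ('6':Char).val.toNat = 54 := rfl
  have e7 : ('7':Char).val.toNat = 55 := rfl
  have e8 : ('8':Char).val.toNat = 56 := rfl
  have e9 : ('9':Char).val.toNat = 57 := rfl
  rw [e0, e1, e2, e3, e4, e5, e6, e7, e8, e9]
  omega

lemma mem_numLocations (cs : List Char) (x : Int) :
    x ∈ pvNumLocations cs ↔ ∃ k : Nat, ∃ hk : k < cs.length, x = (k : Int) ∧ PySem.Chars.isdigit cs[k] = true := by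
  simp only [pvNumLocations, List.mem_append, mem_pvWhere]
  constructor
  · rintro (((((((((⟨k,hk,rfl,he⟩|⟨k,hk,rfl,he⟩)|⟨k,hk,rfl,he⟩)|⟨k,hk,rfl,he⟩)|⟨k,hk,rfl,he⟩)|⟨k,hk,rfl,he⟩)|⟨k,hk,rfl,he⟩)|⟨k,hk,rfl,he⟩)|⟨k,hk,rfl,he⟩)|⟨k,hk,rfl,he⟩) <;>
      exact ⟨k, hk, rfl, (isdigit_iff _).mpr (by tauto)⟩
  · rintro ⟨k, hk, rfl, hd⟩
    rcases (isdigit_iff _).mp hd with h|h|h|h|h|h|h|h|h|h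
    · exact Or.inl <| Or.inl <| Or.inl <| Or.inl <| Or.inl <| Or.inl <| Or.inl <| Or.inl <| Or.inl ⟨k, hk, rfl, h⟩
    · exact Or.inl <| Or.inl <| Or.inl <| Or.inl <| Or.inl <| Or.inl <| Or.inl <| Or.inl <| Or.inr ⟨k, hk, rfl, h⟩
    · exact Or.inl <| Or.inl <| Or.inl <| Or.inl <| Or.inl <| Or.inl <| Or.inl <| Or.inr ⟨k, hk, rfl, h⟩
    · exact Or.inl <| Or.inl <| Or.inl <| Or.inl <| Or.inl <| Or.inl <| Or.inr ⟨k, hk, rfl, h⟩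
    · exact Or.inl <| Or.inl <| Or.inl <| Or.inl <| Or.inl <| Or.inr ⟨k, hk, rfl, h⟩
    · exact Or.inl <| Or.inl <| Or.inl <| Or.inl <| Or.inr ⟨k, hk, rfl, h⟩
    · exact Or.inl <| Or.inl <| Or.inl <| Or.inr ⟨k, hk, rfl, h⟩
    · exact Or.inl <| Or.inl <| Or.inr ⟨k, hk, rfl, h⟩
    · exact Or.inl <| Or.inr ⟨k, hk, rfl, h⟩
    · exact Or.inr ⟨k, hk, rfl, h⟩

lemma true_branch (cs : List Char) (hd : cs.any PySem.Chars.isdigit = true) :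
    ∃ f l : Nat, List.findIdx? PySem.Chars.isdigit cs = some f ∧ pvLdigit cs = some l ∧
      PySem.List.min? (pvNumLocations cs) (fun x => x) = some ((f : Int)) ∧
      PySem.List.max? (pvNumLocations cs) (fun x => x) = some ((l : Int)) ∧
      pvScan cs 0 (-1, -1) = (((f : Int)), ((l : Int))) := by
  -- findIdx? is some
  have hsome : (List.findIdx? PySem.Chars.isdigit cs).isSome = true := by
    rw [List.findIdx?_isSome]; exact hd
  obtain ⟨f, hf⟩ := Option.isSome_iff_exists.mp hsome
  obtain ⟨hfl, hfd, hfmin⟩ := List.findIdx?_eq_some_iff_getElem.mp hf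
  have hlsome : ∃ l, pvLdigit cs = some l := by
    cases hl : pvLdigit cs with
    | none => exact absurd ((pvLdigit_eq_none_iff cs).mp hl cs[f] (List.getElem_mem hfl)) (by simp [hfd])
    | some l => exact ⟨l, rfl⟩
  obtain ⟨l, hl⟩ := hlsome
  obtain ⟨hll, hld, hlmax⟩ := pvLdigit_spec cs l hl
  refine ⟨f, l, hf, hl, ?_, ?_, ?_⟩
  · -- min?
    have hfmem : ((f : Int)) ∈ pvNumLocations cs := (mem_numLocations cs _).mpr ⟨f, hfl, rfl, hfd⟩
    cases hm : PySem.List.min? (pvNumLocations cs) (fun x => x) with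
    | none => rw [PySem.List.min?_eq_none_iff] at hm; rw [hm] at hfmem; cases hfmem
    | some m =>
      obtain ⟨k, hk, rfl, hkd⟩ := (mem_numLocations cs m).mp (PySem.List.min?_mem hm)
      have h1 : (k : Int) ≤ (f : Int) := PySem.List.min?_isMin hm _ hfmem
      have h2 : f ≤ k := by
        by_contra hkf
        exact absurd hkd (by simpa using hfmin k (by omega))
      have : k = f := by omega
      subst this; rfl
  · -- max?
    have hlmem : ((l : Int)) ∈ pvNumLocations cs := (mem_numLocations cs _).mpr ⟨l, hll, rfl, hld⟩
    cases hm : PySem.List.max? (pvNumLocations cs) (fun x => x) with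
    | none => rw [PySem.List.max?_eq_none_iff] at hm; rw [hm] at hlmem; cases hlmem
    | some m =>
      obtain ⟨k, hk, rfl, hkd⟩ := (mem_numLocations cs m).mp (PySem.List.max?_mem hm)
      have h1 : (l : Int) ≤ (k : Int) := PySem.List.max?_isMax hm _ hlmem
      have h2 : k ≤ l := by
        by_contra hkl
        exact absurd hkd (by simp [hlmax k (by omega) hk])
      have : k = l := by omega
      subst this; rfl
  · rw [pvScan_spec cs 0 (-1) (-1) (by omega), hf, hl]
    simp

lemma main_true (cs : List Char) (hd : cs.any PySem.Chars.isdigit = true) :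
    (match PySem.List.min? (pvNumLocations cs) (fun x => x),
           PySem.List.max? (pvNumLocations cs) (fun x => x) with
     | some mn, some mx => String.mk (PySem.List.slice cs (some mn) (some (mx + 1)))
     | _, _ => "")
    = (if (pvScan cs 0 (-1, -1)).1 = -1 then ""
       else String.mk (PySem.List.slice cs (some (pvScan cs 0 (-1, -1)).1)
              (some ((pvScan cs 0 (-1, -1)).2 + 1)))) := by
  obtain ⟨f, l, hf, hl, hmin, hmax, hscan⟩ := true_branch cs hd
  rw [hmin, hmax, hscan]
  have hne : ((f : Int)) ≠ -1 := by omega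
  simp [hne]

-- ===== VERDICT (by name: the statement is the Claim_ definition above) =====
theorem get_id_from_filename_spec : Claim_equal_get_id_from_filename := by
  intro filename all_numbers _ hpre
  unfold Spec_get_id_from_filename get_id_from_filename get_id_from_filename_alt
  unfold Pre_get_id_from_filename at hpre
  generalize pvFileId filename = cs at hpre ⊢
  cases all_numbers with
  | false => simp
  | true => exact main_true cs (hpre rfl)
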